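-- pv_equiv track=rewrite | github.com/marco-zangari/code-katas | src/zero_plentiful.py | zero_plentiful2
-- ===== SOURCE A (Python) =====
-- def zero_plentiful2(arr):
--     """Zero plentiful list is at least one zero and four zeros in sequence.
--
--     input= list of integers
--     output= either number of times of four zero sequences
--             or 0 (for no four sequences)
--     """
--     four_zero = 0
--     count = 0
--
--     for el in arr:
--         if el == 0:
--             count += 1
--             if count >= 4:
--                 four_zero += 1
--                 count = 0
--             if el != 0 and count < 4:
--                 return 0
--         if el != 0 and count > 0:
--             return 0
--         if el != 0:
--             count = 0
--     if four_zero > 0: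
--         return four_zero
--     else:
--         return 0
-- ===== SOURCE B (Python) =====
-- def zero_plentiful2(arr):
--     # Run-length scan: group arr into maximal runs of zero / nonzero values,
--     # then tally length//4 per zero run, failing early on an interior
--     # zero run whose length is not a multiple of 4.
--     runs = []
--     i = 0
--     n = len(arr)
--     while i < n:
--         zero = arr[i] == 0
--         j = i
--         while j < n and (arr[j] == 0) == zero:
--             j += 1
--         runs.append((zero, j - i))
--         i = j
--     total = 0
--     for k in range(len(runs)):
--         zero, length = runs[k]
--         if zero:
--             if k < len(runs) - 1 and length % 4 != 0:
--                 return 0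
--             total += length // 4
--     return total
-- ===== Notes on version B (the rewrite author's own statement) =====
-- stated objective: simpler
-- what changed: Replaces A's per-element counter loop with dead branches by a run-length decomposition: group the list into maximal zero/nonzero runs, then add length//4 per zero run, returning 0 early for an interior zero run whose length is not divisible by 4.
import Mathlib
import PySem

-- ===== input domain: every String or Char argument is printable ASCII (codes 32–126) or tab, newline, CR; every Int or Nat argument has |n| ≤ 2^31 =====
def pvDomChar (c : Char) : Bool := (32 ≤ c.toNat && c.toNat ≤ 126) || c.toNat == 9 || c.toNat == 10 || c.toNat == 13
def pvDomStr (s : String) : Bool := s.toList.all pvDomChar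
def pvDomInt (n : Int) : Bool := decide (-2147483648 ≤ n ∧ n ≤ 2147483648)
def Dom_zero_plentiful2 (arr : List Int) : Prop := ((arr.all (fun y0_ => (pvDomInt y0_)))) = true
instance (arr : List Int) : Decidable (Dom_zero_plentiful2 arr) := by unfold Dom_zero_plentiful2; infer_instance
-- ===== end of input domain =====

-- B replaces A's per-element zero-counter loop by a run-length decomposition of the list (simpler decomposition; same O(n) cost).

-- ===== PORT A =====
-- A: single pass with a counter of consecutive zeros, early return 0 when a
-- nonzero element follows a partial zero run.
def zero_plentiful2_go (l : List Int) (four_zero count : Int) : Int :=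
  match l with
  | [] => if four_zero > 0 then four_zero else 0
  | el :: rest =>
    if el = 0 then
      let count := count + 1
      let p : Int × Int := if count ≥ 4 then (four_zero + 1, 0) else (four_zero, count)
      if el ≠ 0 ∧ p.2 < 4 then 0
      else if el ≠ 0 ∧ p.2 > 0 then 0
      else if el ≠ 0 then zero_plentiful2_go rest p.1 0
      else zero_plentiful2_go rest p.1 p.2
    else
      if el ≠ 0 ∧ count > 0 then 0
      else if el ≠ 0 then zero_plentiful2_go rest four_zero 0
      else zero_plentiful2_go rest four_zero count

def zero_plentiful2 (arr : List Int) : Int :=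
  zero_plentiful2_go arr 0 0

-- ===== PORT B =====
-- B: run-length decomposition (maximal zero/nonzero runs), then a tally pass.
def zp_runs : List Int → List (Bool × Int)
  | [] => []
  | el :: rest =>
    let z : Bool := el == 0
    (z, 1 + ((rest.takeWhile (fun x => (x == 0) == z)).length : Int)) ::
      zp_runs (rest.dropWhile (fun x => (x == 0) == z))
termination_by l => l.length
decreasing_by
  simp only [List.length_cons]
  exact Nat.lt_succ_of_le (List.length_dropWhile_le _ _)

-- 'k < len(runs) - 1' in Source B = the run is not the last one = rest ≠ []
def zp_tally : List (Bool × Int) → Int → Int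
  | [], total => total
  | (z, len) :: rest, total =>
    if z then
      if rest ≠ [] ∧ PySem.Int.mod len 4 ≠ 0 then 0
      else zp_tally rest (total + PySem.Int.floordiv len 4)
    else zp_tally rest total

def zero_plentiful2_alt (arr : List Int) : Int :=
  zp_tally (zp_runs arr) 0

-- ===== PRECONDITION & SPEC =====
def Spec_zero_plentiful2 (arr : List Int) (out : Int) : Prop := out = zero_plentiful2_alt arr
instance (arr : List Int) (out : Int) : Decidable (Spec_zero_plentiful2 arr out) := by unfold Spec_zero_plentiful2; infer_instance

-- ===== CLAIM (what is proved, stated in full; the proofs are below) =====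
def Claim_equal_zero_plentiful2 : Prop := ∀ (arr : List Int), Dom_zero_plentiful2 arr → Spec_zero_plentiful2 arr (zero_plentiful2 arr)

-- ===== LEMMAS AND PROOFS =====

-- consuming m zeros from counter state c (0 ≤ c < 4)
theorem zpA_zeros (m : Nat) (l : List Int) (fz c : Int) (h0 : 0 ≤ c) (h4 : c < 4) :
    zero_plentiful2_go (List.replicate m 0 ++ l) fz c
      = zero_plentiful2_go l (fz + (c + m) / 4) ((c + m) % 4) := by
  induction m generalizing fz c with
  | zero =>
    simp only [List.replicate, List.nil_append, Nat.cast_zero]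
    have h1 : (c + 0) / 4 = 0 := by omega
    have h2 : (c + 0) % 4 = c := by omega
    rw [h1, h2]; ring_nf
  | succ k ih =>
    simp only [List.replicate_succ, List.cons_append]
    rw [zero_plentiful2_go]
    by_cases hc : c + 1 ≥ 4
    · simp only [hc, if_pos, ne_eq, not_true_eq_false,
        false_and, if_false]
      rw [ih (fz + 1) 0 (by omega) (by omega)]
      have e1 : fz + 1 + (0 + (k:Int)) / 4 = fz + (c + (k+1:Nat)) / 4 := by push_cast; omega
      have e2 : (0 + (k:Int)) % 4 = (c + (k+1:Nat)) % 4 := by push_cast; omega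
      rw [e1, e2]
    · simp only [hc, if_false, reduceIte, ne_eq, not_true_eq_false,
        false_and, if_false]
      rw [ih fz (c + 1) (by omega) (by omega)]
      have e1 : fz + (c + 1 + (k:Int)) / 4 = fz + (c + (k+1:Nat)) / 4 := by push_cast; omega
      have e2 : (c + 1 + (k:Int)) % 4 = (c + (k+1:Nat)) % 4 := by push_cast; omega
      rw [e1, e2]

-- a nonzero element with counter 0 is skipped
theorem zpA_nonzero (x : Int) (l : List Int) (fz : Int) (hx : x ≠ 0) :
    zero_plentiful2_go (x :: l) fz 0 = zero_plentiful2_go l fz 0 := by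
  rw [zero_plentiful2_go]; simp [hx]

-- a nonzero element after a partial zero run returns 0
theorem zpA_nonzero_pos (x : Int) (l : List Int) (fz c : Int) (hx : x ≠ 0) (hc : 0 < c) :
    zero_plentiful2_go (x :: l) fz c = 0 := by
  rw [zero_plentiful2_go]; simp [hx, hc]

-- a block of nonzero elements with counter 0 is skipped
theorem zpA_nonzeros (l rest : List Int) (fz : Int) (hl : ∀ x ∈ l, x ≠ 0) :
    zero_plentiful2_go (l ++ rest) fz 0 = zero_plentiful2_go rest fz 0 := by
  induction l with
  | nil => rfl
  | cons x t ih =>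
    rw [List.cons_append, zpA_nonzero x (t ++ rest) fz (hl x (by simp)),
        ih (fun y hy => hl y (by simp [hy]))]

theorem zp_takeWhile_zero_replicate (l : List Int) :
    l.takeWhile (fun x => x == (0:Int)) =
      List.replicate (l.takeWhile (fun x => x == (0:Int))).length 0 := by
  rw [List.eq_replicate_iff]
  refine ⟨rfl, fun x hx => ?_⟩
  simpa using List.mem_takeWhile_imp hx

theorem zp_head_dropWhile {p : Int → Bool} {l : List Int} {y : Int} {t : List Int}
    (h : l.dropWhile p = y :: t) : p y = false := by
  induction l with
  | nil => simp at h
  | cons a s ih =>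
    rw [List.dropWhile_cons] at h
    by_cases hp : p a
    · simp only [hp, if_true] at h; exact ih h
    · simp only [hp] at h
      cases h; simpa using hp

theorem zp_main_aux (n : Nat) : ∀ (l : List Int), l.length ≤ n → ∀ (fz : Int), 0 ≤ fz →
    zero_plentiful2_go l fz 0 = zp_tally (zp_runs l) fz := by
  induction n with
  | zero =>
    intro l hl fz hfz
    have : l = [] := List.eq_nil_of_length_eq_zero (by omega)
    subst this
    rw [zp_runs]
    simp only [zp_tally, zero_plentiful2_go]
    omega
  | succ n ih =>
    intro l hl fz hfz
    cases l with
    | nil =>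
      rw [zp_runs]
      simp only [zp_tally, zero_plentiful2_go]
      omega
    | cons x rest =>
      rw [zp_runs]
      by_cases hx : x = 0
      · subst hx
        simp only [beq_self_eq_true]
        have hpred : (fun y : Int => (y == (0:Int)) == true) = (fun y : Int => y == (0:Int)) := by
          funext y; simp
        rw [hpred]
        set tw := rest.takeWhile (fun y : Int => y == (0:Int)) with htw
        set d := rest.dropWhile (fun y : Int => y == (0:Int)) with hd
        set m := tw.length with hm
        have hsplit : rest = tw ++ d := (List.takeWhile_append_dropWhile).symm
        have hrep : tw = List.replicate m 0 := by
          rw [hm, htw]; exact zp_takeWhile_zero_replicate rest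
        have harr : (0:Int) :: rest = List.replicate (m+1) 0 ++ d := by
          rw [List.replicate_succ, List.cons_append]
          rw [hsplit, hrep]
        rw [harr, zpA_zeros (m+1) d fz 0 (le_refl 0) (by omega)]
        have hv : (0:Int) ≤ fz + (0 + ((m+1:Nat):Int)) / 4 := by positivity
        have hdlen : d.length ≤ n := by
          have h1 : d.length ≤ rest.length := List.length_dropWhile_le _ _
          simp only [List.length_cons] at hl
          omega
        have hdnn : d.length ≤ rest.length := List.length_dropWhile_le _ _
        rcases hdc : d with _ | ⟨y, t⟩
        · 
          have hfd : PySem.Int.floordiv (1 + (m:Int)) 4 = (0 + ((m+1:Nat):Int)) / 4 := by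
            rw [PySem.Int.floordiv_eq_ediv_of_pos (by omega)]; push_cast; omega
          rw [zero_plentiful2_go]
          simp only [zp_runs, zp_tally, ne_eq, not_true_eq_false, false_and, ite_false,
            reduceIte, hfd]
          omega
        · have hy : y ≠ 0 := by
            have hpy := zp_head_dropWhile (hd ▸ hdc)
            simpa using hpy
          have hmod : PySem.Int.mod (1 + (m:Int)) 4 = (0 + ((m+1:Nat):Int)) % 4 := by
            rw [PySem.Int.mod_eq_emod_of_pos (by omega)]; push_cast; omega
          by_cases hc0 : (0 + ((m+1:Nat):Int)) % 4 = 0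
          · rw [hc0]
            have hfd : fz + PySem.Int.floordiv (1 + (m:Int)) 4 = fz + (0 + ((m+1:Nat):Int)) / 4 := by
              rw [PySem.Int.floordiv_eq_ediv_of_pos (by omega)]; push_cast; omega
            have hlen : (y :: t).length ≤ n := by rw [← hdc]; exact hdlen
            rw [ih (y :: t) hlen _ hv]
            simp only [zp_tally, hmod, hc0, ne_eq, not_true_eq_false, and_false, ite_false,
              reduceIte, hfd]
          · rw [zpA_nonzero_pos y t _ _ hy (by omega)]
            have hne : zp_runs (y :: t) ≠ [] := by rw [zp_runs]; simp
            rw [zp_tally]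
            simp only [if_true]
            rw [if_pos ⟨hne, by rw [hmod]; exact hc0⟩]
      · have hx0 : (x == (0:Int)) = false := beq_eq_false_iff_ne.mpr hx
        rw [hx0]
        set P := fun y : Int => (y == (0:Int)) == false with hP
        set d := rest.dropWhile P with hd
        have hall : ∀ z ∈ x :: rest.takeWhile P, z ≠ 0 := by
          intro z hz
          rcases List.mem_cons.mp hz with h | h
          · exact h ▸ hx
          · have hpz := List.mem_takeWhile_imp h
            rw [hP] at hpz
            simpa using hpz
        have hsplit : x :: rest = (x :: rest.takeWhile P) ++ d := by
          rw [List.cons_append, hd, List.takeWhile_append_dropWhile]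
        rw [hsplit, zpA_nonzeros _ d fz hall]
        have hdl : d.length ≤ n := by
          have h1 : d.length ≤ rest.length := List.length_dropWhile_le _ _
          simp only [List.length_cons] at hl
          omega
        rw [ih d hdl fz hfz]
        simp [zp_tally]

theorem zp_main (arr : List Int) (fz : Int) (hfz : 0 ≤ fz) :
    zero_plentiful2_go arr fz 0 = zp_tally (zp_runs arr) fz :=
  zp_main_aux arr.length arr (le_refl _) fz hfz

-- ===== VERDICT (by name: the statement is the Claim_ definition above) =====
theorem zero_plentiful2_spec : Claim_equal_zero_plentiful2 := by
  intro arr _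
  unfold Spec_zero_plentiful2 zero_plentiful2 zero_plentiful2_alt
  exact zp_main arr 0 (le_refl 0)
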